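-- pv_equiv track=rewrite | github.com/nssathish/hackerrank-python | shoe_shop_dictionary.py | manage_purchase
-- ===== SOURCE A (Python) =====
-- def manage_purchase(shoe_sizes, purchase_plan):
--     shoe_rack = dict()
--     earn = 0
--
--     for size in shoe_sizes.split():
--         if shoe_rack.get(size) is None:
--             shoe_rack[size] = 1
--         else:
--             shoe_rack[size] = shoe_rack.get(size) + 1
--
--     for purchase in purchase_plan:
--         size, cost = purchase.split()
--
--         if shoe_rack.get(size) is not None:
--             shoe_rack[size] = shoe_rack.get(size) - 1
--             earn += int(cost)
--             if shoe_rack.get(size) == 0: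
--                 del shoe_rack[size]
--
--     return earn
-- ===== SOURCE B (Python) =====
-- def manage_purchase(shoe_sizes, purchase_plan):
--     avail = {}
--     for s in shoe_sizes.split():
--         avail[s] = avail.get(s, 0) + 1
--     index = {}
--     for purchase in purchase_plan:
--         size, cost = purchase.split()
--         index.setdefault(size, []).append(cost)
--     earn = 0
--     for size, costs in index.items():
--         earn += sum(int(c) for c in costs[:avail.get(size, 0)])
--     return earn
-- ===== Notes on version B (the rewrite author's own statement) =====
-- stated objective: alternative
-- what changed: Replaces the in-order stock-consuming loop (mutable rack dict with decrement-and-delete per purchase) by an index-first pass: group all purchase costs per size once, then for each size sum the first min(available, requested) costs.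
import Mathlib
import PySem

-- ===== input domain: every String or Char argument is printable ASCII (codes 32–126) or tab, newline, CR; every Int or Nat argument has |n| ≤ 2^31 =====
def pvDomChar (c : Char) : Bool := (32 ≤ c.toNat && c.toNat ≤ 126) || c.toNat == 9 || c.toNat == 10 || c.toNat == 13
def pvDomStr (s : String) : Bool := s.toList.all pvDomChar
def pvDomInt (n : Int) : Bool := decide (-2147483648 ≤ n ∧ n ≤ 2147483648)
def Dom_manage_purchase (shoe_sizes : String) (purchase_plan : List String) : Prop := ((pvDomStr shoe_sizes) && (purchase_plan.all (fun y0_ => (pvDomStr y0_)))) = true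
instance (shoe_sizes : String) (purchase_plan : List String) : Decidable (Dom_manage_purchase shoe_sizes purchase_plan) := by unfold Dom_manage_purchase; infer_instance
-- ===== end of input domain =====

-- B is an alternative, index-first decomposition: group the purchase costs per size once,
-- then sum the first min(available, requested) costs per size (equal return value; A mutates nothing observable).

-- ===== PORT A =====
-- the body of A's second loop (one purchase): unpack, honour if the size is still racked, delete exhausted sizes
def aStep (st : PySem.Dict String Int × Int) (purchase : String) : PySem.Dict String Int × Int :=
  match PySem.Str.split₀ purchase with
  | [size, cost] =>
    (match st.1.get? size with
     | some c =>
       let d := st.1.insert size (c - 1)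
       let e := st.2 + (PySem.Int.ofStr? cost).getD 0
       if d.get? size = some (0 : Int) then (d.erase size, e) else (d, e)
     | none => st)
  | _ => st   -- Python raises ValueError (unpack); outside Pre_

def manage_purchase (shoe_sizes : String) (purchase_plan : List String) : Int :=
  let shoe_rack : PySem.Dict String Int :=
    (PySem.Str.split₀ shoe_sizes).foldl (fun d size =>
      match d.get? size with
      | none => d.insert size 1
      | some c => d.insert size (c + 1)) PySem.Dict.empty
  (purchase_plan.foldl aStep (shoe_rack, 0)).2

-- ===== PORT B =====
-- one purchase of B's indexing loop: index.setdefault(size, []).append(cost)  (= index[size] = index.get(size, []) + [cost])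
def bStep (d : PySem.Dict String (List String)) (purchase : String) : PySem.Dict String (List String) :=
  match PySem.Str.split₀ purchase with
  | [size, cost] => d.modify size [] (· ++ [cost])
  | _ => d   -- Python raises ValueError (unpack); outside Pre_

def manage_purchase_alt (shoe_sizes : String) (purchase_plan : List String) : Int :=
  let avail : PySem.Dict String Int :=
    (PySem.Str.split₀ shoe_sizes).foldl (fun d s => d.insert s (d.getD s 0 + 1)) PySem.Dict.empty
  let index : PySem.Dict String (List String) := purchase_plan.foldl bStep PySem.Dict.empty
  index.items.foldl (fun earn sc =>
    earn + ((PySem.List.slice sc.2 none (some (avail.getD sc.1 0))).map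
      (fun c => (PySem.Int.ofStr? c).getD 0)).sum) 0

-- ===== PRECONDITION & SPEC =====
-- the cost fields of the plan's purchases of one given size, in plan order (used by Pre_ and the proofs)
def costsOf (s : String) (plan : List String) : List String :=
  plan.filterMap (fun p => match PySem.Str.split₀ p with
    | [a, c] => if a = s then some c else none
    | _ => none)

-- Pre_ excludes exactly the inputs on which A raises ValueError: a purchase that does not split into
-- exactly two fields (unpack error), or an honoured purchase whose cost is not an int literal — a
-- purchase of size s is honoured precisely when it is among the first count(s) purchases of that size,
-- so the condition is: per stocked size, the first count(s) costs of that size all parse as ints.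
def Pre_manage_purchase (shoe_sizes : String) (purchase_plan : List String) : Prop :=
  (∀ p ∈ purchase_plan, (PySem.Str.split₀ p).length = 2) ∧
  ∀ s ∈ PySem.Str.split₀ shoe_sizes,
    ∀ c ∈ (costsOf s purchase_plan).take ((PySem.Str.split₀ shoe_sizes).count s),
      (PySem.Int.ofStr? c).isSome = true
instance (shoe_sizes : String) (purchase_plan : List String) : Decidable (Pre_manage_purchase shoe_sizes purchase_plan) := by unfold Pre_manage_purchase; infer_instance

def pvWitness_manage_purchase : String × List String := ("7 8 7", ["7 50", "8 40", "9 30"])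

def Spec_manage_purchase (shoe_sizes : String) (purchase_plan : List String) (out : Int) : Prop := out = manage_purchase_alt shoe_sizes purchase_plan
instance (shoe_sizes : String) (purchase_plan : List String) (out : Int) : Decidable (Spec_manage_purchase shoe_sizes purchase_plan out) := by unfold Spec_manage_purchase; infer_instance

-- ===== CLAIM (what is proved, stated in full; the proofs are below) =====
def Claim_equal_manage_purchase : Prop := ∀ (shoe_sizes : String) (purchase_plan : List String), Dom_manage_purchase shoe_sizes purchase_plan → Pre_manage_purchase shoe_sizes purchase_plan → Spec_manage_purchase shoe_sizes purchase_plan (manage_purchase shoe_sizes purchase_plan)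

-- ===== LEMMAS AND PROOFS =====

-- int(cost) as both ports compute it on an honoured purchase
def parseI (c : String) : Int := (PySem.Int.ofStr? c).getD 0

-- common reference semantics: consume the plan in order against a stock function f
def Bsum (f : String → Int) : List String → Int
  | [] => 0
  | p :: rest =>
    match PySem.Str.split₀ p with
    | [a, c] => if 0 < f a then parseI c + Bsum (Function.update f a (f a - 1)) rest
                else Bsum f rest
    | _ => Bsum f rest

theorem find?_filter_ne (l : List (String × Int)) (k t : String) :
    List.find? (fun p => p.1 == t) (List.filter (fun p => !(p.1 == k)) l)
      = if t = k then none else List.find? (fun p => p.1 == t) l := by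
  induction l with
  | nil => simp
  | cons a l ih =>
    by_cases hak : a.1 = k
    · rw [List.filter_cons_of_neg (by simp [hak]), ih]
      by_cases htk : t = k
      · simp [htk]
      · have hat : (a.1 == t) = false := by
          simp only [beq_eq_false_iff_ne, ne_eq]
          exact fun he => htk (he.symm.trans hak)
        simp [if_neg htk, hat]
    · rw [List.filter_cons_of_pos (by simp [hak])]
      simp only [List.find?_cons]
      cases hat : (a.1 == t) with
      | true =>
        have htk : ¬ t = k := fun he => hak ((eq_of_beq hat).trans he)
        simp [hat, htk]
      | false => simp [hat, ih]

theorem get?_erase' (d : PySem.Dict String Int) (k t : String) :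
    (d.erase k).get? t = if t = k then none else d.get? t := by
  simp only [PySem.Dict.erase, PySem.Dict.get?, find?_filter_ne]
  split <;> simp

theorem sum_map_add_single (S : List String) (a : String) (x : Int) (g : String → Int)
    (hnd : S.Nodup) (ha : a ∈ S) :
    (S.map (fun s => g s + if s = a then x else 0)).sum = (S.map g).sum + x := by
  induction S with
  | nil => cases ha
  | cons s S ih =>
    rw [List.map_cons, List.map_cons, List.sum_cons, List.sum_cons]
    by_cases hsa : s = a
    · subst hsa
      have hnotin : s ∉ S := (List.nodup_cons.1 hnd).1
      have hmap : S.map (fun t => g t + if t = s then x else 0) = S.map g := by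
        apply List.map_congr_left
        intro t ht
        have hts : ¬ t = s := fun he => hnotin (he ▸ ht)
        rw [if_neg hts, add_zero]
      rw [hmap, if_pos rfl]; ring
    · have haS : a ∈ S := by
        rcases List.mem_cons.1 ha with h | h
        · exact absurd h.symm hsa
        · exact h
      rw [ih (List.nodup_cons.1 hnd).2 haS, if_neg hsa]; ring

theorem costsOf_cons (s p : String) (rest : List String) :
    costsOf s (p :: rest)
      = (match PySem.Str.split₀ p with
         | [a, c] => if a = s then c :: costsOf s rest else costsOf s rest
         | _ => costsOf s rest) := by
  simp only [costsOf, List.filterMap_cons]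
  rcases h : PySem.Str.split₀ p with _ | ⟨a, _ | ⟨c, _ | _⟩⟩
  · rfl
  · rfl
  · by_cases has : a = s
    · simp [has]
    · simp [has]
  · rfl

-- Bsum equals the per-size bounded sums, summed over any nodup list S covering all sizes of the plan
theorem Bsum_eq_groups (plan : List String) (f : String → Int) (S : List String)
    (hnd : S.Nodup)
    (hS : ∀ p ∈ plan, ∀ a c, PySem.Str.split₀ p = [a, c] → a ∈ S) :
    Bsum f plan
      = (S.map (fun s => (((costsOf s plan).take (f s).toNat).map parseI).sum)).sum := by
  induction plan generalizing f with
  | nil =>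
    have hmap : ∀ s ∈ S, (((costsOf s []).take (f s).toNat).map parseI).sum = (fun _ : String => (0 : Int)) s := by
      intro t _; simp [costsOf]
    rw [List.map_congr_left hmap]
    simp [Bsum]
  | cons p rest ih =>
    rcases h : PySem.Str.split₀ p with _ | ⟨a, _ | ⟨c, _ | _⟩⟩
    · -- split gives []
      have hmap : ∀ s, costsOf s (p :: rest) = costsOf s rest := by
        intro s; rw [costsOf_cons, h]
      simp only [Bsum, h]
      rw [ih f (fun q hq => hS q (List.mem_cons_of_mem _ hq))]
      congr 1; apply List.map_congr_left; intro t _; rw [hmap]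
    · -- split gives [a]
      have hmap : ∀ s, costsOf s (p :: rest) = costsOf s rest := by
        intro s; rw [costsOf_cons, h]
      simp only [Bsum, h]
      rw [ih f (fun q hq => hS q (List.mem_cons_of_mem _ hq))]
      congr 1; apply List.map_congr_left; intro t _; rw [hmap]
    case cons.cons.cons.cons =>
      have hmap : ∀ s, costsOf s (p :: rest) = costsOf s rest := by
        intro s; rw [costsOf_cons, h]
      simp only [Bsum, h]
      rw [ih f (fun q hq => hS q (List.mem_cons_of_mem _ hq))]
      congr 1; apply List.map_congr_left; intro t _; rw [hmap]
    · -- split gives [a, c]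
      have hcosts : ∀ s, costsOf s (p :: rest)
          = if a = s then c :: costsOf s rest else costsOf s rest := by
        intro s; rw [costsOf_cons, h]
      have haS : a ∈ S := hS p (List.mem_cons_self) a c h
      by_cases hpos : 0 < f a
      · have hstep : ∀ s ∈ S,
            (((costsOf s (p :: rest)).take (f s).toNat).map parseI).sum
              = (((costsOf s rest).take ((Function.update f a (f a - 1)) s).toNat).map parseI).sum
                + if s = a then parseI c else 0 := by
          intro s _
          by_cases hsa : s = a
          · subst hsa
            rw [hcosts s, if_pos rfl]
            have h1 : (f s).toNat = ((f s - 1).toNat) + 1 := by omega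
            rw [h1, List.take_succ_cons, Function.update_self, List.map_cons, List.sum_cons,
              if_pos rfl]
            ring
          · rw [hcosts s, if_neg (fun he => hsa he.symm), if_neg hsa,
              Function.update_of_ne hsa]
            ring
        simp only [Bsum, h, if_pos hpos]
        rw [ih (Function.update f a (f a - 1)) (fun q hq => hS q (List.mem_cons_of_mem _ hq))]
        have : (S.map (fun s => (((costsOf s (p :: rest)).take (f s).toNat).map parseI).sum)).sum
            = (S.map (fun s => (((costsOf s rest).take ((Function.update f a (f a - 1)) s).toNat).map parseI).sum)).sum + parseI c := by
          rw [← sum_map_add_single S a (parseI c)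
              (fun s => (((costsOf s rest).take ((Function.update f a (f a - 1)) s).toNat).map parseI).sum) hnd haS]
          congr 1; apply List.map_congr_left; intro s hs; exact hstep s hs
        rw [this]; ring
      · have h0 : (f a).toNat = 0 := by omega
        have hstep : ∀ s ∈ S,
            (((costsOf s (p :: rest)).take (f s).toNat).map parseI).sum
              = (((costsOf s rest).take (f s).toNat).map parseI).sum := by
          intro s _
          by_cases hsa : a = s
          · subst hsa; rw [hcosts a, if_pos rfl, h0]; simp
          · rw [hcosts s, if_neg hsa]
        simp only [Bsum, h, if_neg hpos]
        rw [ih f (fun q hq => hS q (List.mem_cons_of_mem _ hq))]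
        congr 1; apply List.map_congr_left; intro s hs; exact (hstep s hs).symm

-- A's loop computes Bsum of the remaining stock (rack values stay positive throughout)
theorem loopA_eq (plan : List String) (d : PySem.Dict String Int) (e : Int)
    (hpos : ∀ s c, d.get? s = some c → 0 < c) :
    (plan.foldl aStep (d, e)).2 = e + Bsum (fun s => d.getD s 0) plan := by
  induction plan generalizing d e with
  | nil => simp [Bsum]
  | cons p rest ih =>
    rcases h : PySem.Str.split₀ p with _ | ⟨a, _ | ⟨c, _ | _⟩⟩
    · simp only [List.foldl_cons, aStep, h, Bsum]; exact ih d e hpos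
    · simp only [List.foldl_cons, aStep, h, Bsum]; exact ih d e hpos
    case cons.cons.cons.cons =>
      simp only [List.foldl_cons, aStep, h, Bsum]; exact ih d e hpos
    · cases hg : d.get? a with
      | none =>
        have hf : d.getD a 0 = 0 := PySem.Dict.getD_of_get?_eq_none d 0 hg
        simp only [List.foldl_cons, aStep, h, hg, Bsum, hf]
        rw [if_neg (by omega)]
        exact ih d e hpos
      | some v =>
        have hv : 0 < v := hpos a v hg
        have hfa : d.getD a 0 = v := PySem.Dict.getD_of_get?_eq_some d 0 hg
        have hget1 : (d.insert a (v - 1)).get? a = some (v - 1) := PySem.Dict.get?_insert_self d a (v - 1)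
        by_cases hz : v - 1 = 0
        · -- rack count hits zero: erase
          have hif : (d.insert a (v - 1)).get? a = some (0 : Int) := by rw [hget1, hz]
          simp only [List.foldl_cons, aStep, h, hg]
          rw [if_pos hif]
          have hpos2 : ∀ s w, ((d.insert a (v - 1)).erase a).get? s = some w → 0 < w := by
            intro s w hw
            rw [get?_erase'] at hw
            by_cases hsa : s = a
            · simp [hsa] at hw
            · rw [if_neg hsa, PySem.Dict.get?_insert, if_neg hsa] at hw
              exact hpos s w hw
          rw [ih _ _ hpos2]
          have hfun : (fun s => ((d.insert a (v - 1)).erase a).getD s 0)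
              = Function.update (fun s => d.getD s 0) a ((fun s => d.getD s 0) a - 1) := by
            funext t
            rw [Function.update_apply, PySem.Dict.getD_eq_get?_getD, get?_erase']
            by_cases hta : t = a
            · rw [if_pos hta, if_pos hta]
              simp only [Option.getD_none, hfa]
              omega
            · rw [if_neg hta, if_neg hta, PySem.Dict.get?_insert, if_neg hta,
                ← PySem.Dict.getD_eq_get?_getD]
          rw [hfun]
          simp only [Bsum, h, hfa]
          rw [if_pos hv]
          simp [parseI]; ring
        · -- still in stock: keep decremented count
          have hif : ¬((d.insert a (v - 1)).get? a = some (0 : Int)) := by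
            rw [hget1]; simp; omega
          simp only [List.foldl_cons, aStep, h, hg]
          rw [if_neg hif]
          have hpos2 : ∀ s w, (d.insert a (v - 1)).get? s = some w → 0 < w := by
            intro s w hw
            rw [PySem.Dict.get?_insert] at hw
            by_cases hsa : s = a
            · rw [if_pos hsa] at hw; injection hw with hw; omega
            · rw [if_neg hsa] at hw; exact hpos s w hw
          rw [ih _ _ hpos2]
          have hfun : (fun s => (d.insert a (v - 1)).getD s 0)
              = Function.update (fun s => d.getD s 0) a ((fun s => d.getD s 0) a - 1) := by
            funext t
            rw [Function.update_apply, PySem.Dict.getD_insert]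
            simp [hfa]
          rw [hfun]
          simp only [Bsum, h, hfa]
          rw [if_pos hv]
          simp [parseI]; ring

-- A's first loop builds exactly Counter(sizes)
theorem rack_eq_counter (sizes : List String) :
    sizes.foldl (fun d size =>
      match d.get? size with
      | none => d.insert size 1
      | some c => d.insert size (c + 1)) (PySem.Dict.empty : PySem.Dict String Int) = PySem.Dict.counter sizes := by
  rw [← PySem.Dict.foldl_insert_getD_add_one_eq_counter]
  apply PySem.List.foldl_congr_mem
  intro d s _
  cases hg : d.get? s with
  | none => rw [PySem.Dict.getD_of_get?_eq_none d 0 hg]; simp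
  | some c => rw [PySem.Dict.getD_of_get?_eq_some d 0 hg]

-- B's index: contents per size
theorem getD_indexFold (plan : List String) (d : PySem.Dict String (List String)) (s : String) :
    (plan.foldl bStep d).getD s [] = d.getD s [] ++ costsOf s plan := by
  induction plan generalizing d with
  | nil => simp [costsOf]
  | cons p rest ih =>
    rw [List.foldl_cons, ih, costsOf_cons]
    rcases h : PySem.Str.split₀ p with _ | ⟨a, _ | ⟨c, _ | _⟩⟩ <;>
      simp only [bStep, h]
    by_cases has : a = s
    · subst has; rw [PySem.Dict.getD_modify_self]; simp
    · rw [PySem.Dict.getD_modify_of_ne _ _ _ (fun he => has he.symm)]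
      simp [has]

-- B's index: keys stay nodup
theorem nodup_keys_indexFold (plan : List String) (d : PySem.Dict String (List String))
    (hnd : d.keys.Nodup) : (plan.foldl bStep d).keys.Nodup := by
  induction plan generalizing d with
  | nil => exact hnd
  | cons p rest ih =>
    rw [List.foldl_cons]
    apply ih
    rcases h : PySem.Str.split₀ p with _ | ⟨a, _ | ⟨c, _ | _⟩⟩ <;> simp only [bStep, h]
    · exact hnd
    · exact hnd
    · rw [PySem.Dict.keys_modify]
      exact PySem.Dict.nodup_keys_insert _ _ _ hnd
    · exact hnd

-- B's index: membership of keys is monotone along the fold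
theorem mem_keys_indexFold_mono (plan : List String) (d : PySem.Dict String (List String))
    (s : String) (hs : s ∈ d.keys) : s ∈ (plan.foldl bStep d).keys := by
  induction plan generalizing d with
  | nil => exact hs
  | cons p rest ih =>
    rw [List.foldl_cons]
    apply ih
    rcases h : PySem.Str.split₀ p with _ | ⟨a, _ | ⟨c, _ | _⟩⟩ <;> simp only [bStep, h]
    · exact hs
    · exact hs
    · rw [PySem.Dict.keys_modify]
      exact (PySem.Dict.mem_keys_insert _ _ _ _).2 (Or.inr hs)
    · exact hs

-- B's index: every size occurring in the plan is a key
theorem mem_keys_indexFold (plan : List String) (d : PySem.Dict String (List String))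
    (p : String) (hp : p ∈ plan) (a c : String) (h : PySem.Str.split₀ p = [a, c]) :
    a ∈ (plan.foldl bStep d).keys := by
  induction plan generalizing d with
  | nil => cases hp
  | cons q rest ih =>
    rw [List.foldl_cons]
    rcases List.mem_cons.1 hp with rfl | hmem
    · apply mem_keys_indexFold_mono
      simp only [bStep, h, PySem.Dict.keys_modify]
      exact (PySem.Dict.mem_keys_insert _ _ _ _).2 (Or.inl rfl)
    · exact ih _ hmem

-- ===== VERDICT (by name: the statement is the Claim_ definition above) =====
theorem manage_purchase_spec : Claim_equal_manage_purchase := by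
  intro shoe_sizes plan _ _
  unfold Spec_manage_purchase manage_purchase manage_purchase_alt
  rw [rack_eq_counter, PySem.Dict.foldl_insert_getD_add_one_eq_counter]
  set sizes := PySem.Str.split₀ shoe_sizes with hsz
  -- A side
  have hposA : ∀ (s : String) (c : Int), (PySem.Dict.counter sizes).get? s = some c → 0 < c := by
    intro s c hg
    have hmem : s ∈ sizes := by
      have := PySem.Dict.contains_eq_isSome_get? (PySem.Dict.counter sizes) s
      rw [hg] at this
      rw [PySem.Dict.contains_counter] at this
      simpa using this.symm
    have := PySem.Dict.getD_of_get?_eq_some (PySem.Dict.counter sizes) 0 hg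
    rw [PySem.Dict.getD_counter] at this
    have hc : 0 < sizes.count s := List.count_pos_iff.2 hmem
    omega
  rw [loopA_eq plan _ 0 hposA]
  -- B side
  set index := plan.foldl bStep PySem.Dict.empty with hidx
  have hnd : index.keys.Nodup := nodup_keys_indexFold plan _ (by simp [PySem.Dict.nodup_keys_empty])
  rw [PySem.List.foldl_add, PySem.Dict.items_eq_map_keys index hnd []]
  rw [List.map_map]
  have hmapeq : ∀ k ∈ index.keys,
      ((fun sc : String × List String =>
          ((PySem.List.slice sc.2 none (some ((PySem.Dict.counter sizes).getD sc.1 0))).map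
            (fun c => (PySem.Int.ofStr? c).getD 0)).sum) ∘ fun k => (k, index.getD k []))
        k
        = (((costsOf k plan).take ((sizes.count k : Int)).toNat).map parseI).sum := by
    intro k _
    simp only [Function.comp]
    rw [PySem.Dict.getD_counter, PySem.List.slice_to _ (by positivity)]
    rw [hidx, getD_indexFold, PySem.Dict.getD_empty, List.nil_append]
    rfl
  rw [List.map_congr_left hmapeq]
  rw [Bsum_eq_groups plan _ index.keys hnd
    (fun p hp a c h => mem_keys_indexFold plan _ p hp a c h)]
  simp only [PySem.Dict.getD_counter, zero_add]
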